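-- pv_equiv track=rewrite | github.com/n0mber/algoritmit_1 | fliptwo.py | solve
-- ===== SOURCE A (Python) =====
-- from collections import deque
--
-- def solve(n,k):
--     lst = deque(range(1, n+1))
--     for i in range(0, k):
--         eka = lst.popleft()
--         toka = lst.popleft()
--         lst.append(toka)
--         lst.append(eka)
--         #away = (lst.pop(1), lst.pop(0))
--         #lst.extend(away)
--
--     return lst[0]
-- ===== SOURCE B (Python) =====
-- def solve(n, k):
--     # The step L -> L[2:] + [L[1], L[0]] is a fixed permutation of positions,
--     # so the front after k steps has a closed form via the orbit of position 0.
--     if k <= 0: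
--         return 1
--     if n % 2 == 1:
--         p = (n + 1) // 2
--         return 2 * (k % p) + 1
--     r = k % n
--     if r < n // 2:
--         return 2 * r + 1
--     return 2 * (r - n // 2) + 2
-- ===== Notes on version B (the rewrite author's own statement) =====
-- stated objective: faster
-- what changed: A simulates k deque steps; B notes each step applies one fixed position permutation, so the front after k steps is the orbit of position 0, giving a closed-form answer from k mod the orbit length ((n+1)/2 for odd n, n for even n).
import Mathlib
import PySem

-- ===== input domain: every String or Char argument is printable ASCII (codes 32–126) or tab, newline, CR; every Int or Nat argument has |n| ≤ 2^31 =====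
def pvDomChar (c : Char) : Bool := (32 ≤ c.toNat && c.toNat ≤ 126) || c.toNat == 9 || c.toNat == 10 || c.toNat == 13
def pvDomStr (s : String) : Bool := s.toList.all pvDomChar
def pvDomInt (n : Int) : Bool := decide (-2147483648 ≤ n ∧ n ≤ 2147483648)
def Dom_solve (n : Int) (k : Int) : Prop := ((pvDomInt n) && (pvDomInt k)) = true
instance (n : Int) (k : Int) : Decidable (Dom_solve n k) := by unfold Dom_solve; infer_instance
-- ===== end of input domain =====

-- B replaces A's O(k) step-by-step deque simulation by a closed form: each step is the
-- same fixed permutation of positions, so the front after k steps follows from k mod the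
-- orbit length of position 0 (faster, asymptotic).

-- ===== PORT A =====
-- one loop iteration: popleft two, append them swapped; none = IndexError (fewer than 2 elements)
def stepA (l : List Int) : Option (List Int) :=
  match l with
  | eka :: toka :: rest => some (rest ++ [toka, eka])
  | _ => none

def loopA : Nat → Option (List Int) → Option (List Int)
  | 0, s => s
  | (m+1), s => loopA m (s.bind stepA)

def solve (n : Int) (k : Int) : Int :=
  -- lst[0]; none (= IndexError from popleft or from lst[0]) is excluded by Pre_, .getD 0 is junk there
  ((loopA k.toNat (some (PySem.List.pyRange 1 (n+1) 1))).bind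
      (fun l => PySem.List.pyGet? l 0)).getD 0

-- ===== PORT B =====
def solve_alt (n : Int) (k : Int) : Int :=
  if k ≤ 0 then 1
  else if PySem.Int.mod n 2 = 1 then
    2 * PySem.Int.mod k (PySem.Int.floordiv (n+1) 2) + 1
  else
    if PySem.Int.mod k n < PySem.Int.floordiv n 2 then 2 * PySem.Int.mod k n + 1
    else 2 * (PySem.Int.mod k n - PySem.Int.floordiv n 2) + 2

-- ===== PRECONDITION & SPEC =====
-- A raises IndexError when the deque is empty (n ≤ 0) or when a swap step runs with a
-- single element (n = 1 and k ≥ 1); exactly those inputs are excluded.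
def Pre_solve (n : Int) (k : Int) : Prop := 1 ≤ n ∧ (1 ≤ k → 2 ≤ n)
instance (n : Int) (k : Int) : Decidable (Pre_solve n k) := by unfold Pre_solve; infer_instance
def pvWitness_solve : Int × Int := (4, 5)

def Spec_solve (n : Int) (k : Int) (out : Int) : Prop := out = solve_alt n k
instance (n : Int) (k : Int) (out : Int) : Decidable (Spec_solve n k out) := by unfold Spec_solve; infer_instance

-- ===== CLAIM (what is proved, stated in full; the proofs are below) =====
def Claim_equal_solve : Prop := ∀ (n : Int) (k : Int), Dom_solve n k → Pre_solve n k → Spec_solve n k (solve n k)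

-- ===== LEMMAS AND PROOFS =====

-- the fixed position permutation one step applies: new[i] = old[gfun m i]
def gfun (m : Nat) (i : Nat) : Nat := if i + 2 < m then i + 2 else if i + 2 = m then 1 else 0

lemma range_add_two (m : Nat) :
    List.range (m + 2) = 0 :: 1 :: (List.range m).map (fun i => i + 2) := by
  rw [show m + 2 = (m + 1) + 1 from rfl, List.range_succ_eq_map, List.range_succ_eq_map]
  simp [List.map_map, Function.comp_def]

lemma stepA_map (m : Nat) (hm : 2 ≤ m) (h : Nat → Int) :
    stepA ((List.range m).map h) = some ((List.range m).map (fun i => h (gfun m i))) := by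
  obtain ⟨m', rfl⟩ : ∃ m', m = m' + 2 := ⟨m - 2, by omega⟩
  have hL : (List.range (m' + 2)).map h
      = h 0 :: h 1 :: ((List.range m').map (fun i => h (i + 2))) := by
    rw [range_add_two]
    simp [List.map_map, Function.comp_def]
  rw [hL]
  simp only [stepA]
  congr 1
  apply List.ext_getElem
  · simp
  · intro j hj1 hj2
    simp only [List.getElem_map, List.getElem_range]
    by_cases hj : j < m'
    · rw [List.getElem_append_left (by simpa using hj)]
      simp only [List.getElem_map, List.getElem_range]
      simp only [gfun, if_pos (show j + 2 < m' + 2 by omega)]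
    · have hlen : ((List.range m').map (fun i => h (i + 2))).length = m' := by simp
      have hj' : j = m' ∨ j = m' + 1 := by
        simp only [List.length_append, List.length_cons, List.length_nil, hlen] at hj1
        omega
      rcases hj' with rfl | rfl
      · rw [List.getElem_append_right (by omega)]
        simp only [hlen, gfun]
        norm_num
      · rw [List.getElem_append_right (by omega)]
        simp only [hlen, gfun]
        norm_num

lemma loopA_map (t m : Nat) (hm : 2 ≤ m) (h : Nat → Int) :
    loopA t (some ((List.range m).map h)) =
      some ((List.range m).map (fun i => h ((gfun m)^[t] i))) := by
  induction t generalizing h with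
  | zero => simp [loopA]
  | succ t ih =>
      have hbind : (some ((List.range m).map h)).bind stepA = stepA ((List.range m).map h) := rfl
      rw [loopA, hbind, stepA_map m hm h, ih (fun i => h (gfun m i))]
      simp only [Function.iterate_succ_apply']

-- closed form of the orbit of position 0
def posF (m : Nat) (t : Nat) : Nat :=
  if m % 2 = 1 then 2 * (t % ((m + 1) / 2))
  else if t % m < m / 2 then 2 * (t % m) else 2 * (t % m - m / 2) + 1

lemma mod_succ (t p : Nat) (hp : 2 ≤ p) :
    (t + 1) % p = if t % p + 1 = p then 0 else t % p + 1 := by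
  have h1 : (t + 1) % p = (t % p + 1 % p) % p := Nat.add_mod t 1 p
  rw [Nat.mod_eq_of_lt (show 1 < p by omega)] at h1
  have h2 : t % p < p := Nat.mod_lt _ (by omega)
  rw [h1]
  split_ifs with h
  · rw [h, Nat.mod_self]
  · exact Nat.mod_eq_of_lt (by omega)

lemma iterate_gfun (m : Nat) (hm : 2 ≤ m) (t : Nat) : (gfun m)^[t] 0 = posF m t := by
  induction t with
  | zero =>
      simp only [Function.iterate_zero, id_eq, posF, Nat.zero_mod]
      split_ifs <;> omega
  | succ t ih =>
      rw [Function.iterate_succ_apply', ih]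
      by_cases ho : m % 2 = 1
      · simp only [posF, if_pos ho]
        have hp2 : 2 ≤ (m + 1) / 2 := by omega
        rw [mod_succ t _ hp2]
        have hr : t % ((m + 1) / 2) < (m + 1) / 2 := Nat.mod_lt _ (by omega)
        set p := (m + 1) / 2 with hpdef
        set r := t % p with hrdef
        simp only [gfun]
        split_ifs <;> omega
      · simp only [posF, if_neg ho]
        rw [mod_succ t m (by omega)]
        have hr : t % m < m := Nat.mod_lt _ (by omega)
        set r := t % m with hrdef
        simp only [gfun]
        split_ifs <;> omega

-- ===== VERDICT (by name: the statement is the Claim_ definition above) =====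
theorem solve_spec : Claim_equal_solve := by
  intro n k _ hp
  obtain ⟨hn1, hnk⟩ := hp
  unfold Spec_solve
  by_cases hk : k ≤ 0
  · have ht : k.toNat = 0 := by omega
    unfold solve solve_alt
    rw [ht, PySem.List.pyRange_one_cons (by omega : (1:Int) < n + 1), if_pos hk]
    simp [loopA]
  · have hk1 : 1 ≤ k := by omega
    have hn2 : 2 ≤ n := hnk hk1
    obtain ⟨m, rfl⟩ : ∃ m : Nat, n = (m : Int) := ⟨n.toNat, by omega⟩
    obtain ⟨t, rfl⟩ : ∃ t : Nat, k = (t : Int) := ⟨k.toNat, by omega⟩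
    have hm2 : 2 ≤ m := by omega
    -- evaluate A's port to 1 + posF m t
    have hinit : PySem.List.pyRange 1 ((m : Int) + 1) 1
        = (List.range m).map (fun i : Nat => (1 : Int) + (i : Int)) := by
      have hmm : ((m : Int) + 1 - 1).toNat = m := by omega
      rw [PySem.List.pyRange_one, hmm]
    have hA : solve (m : Int) (t : Int) = 1 + (posF m t : Int) := by
      unfold solve
      rw [hinit, Int.toNat_natCast, loopA_map t m hm2 _]
      obtain ⟨m', rfl⟩ : ∃ m', m = m' + 2 := ⟨m - 2, by omega⟩
      rw [range_add_two]
      simp only [List.map_cons]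
      rw [iterate_gfun _ hm2 t]
      simp [PySem.List.pyGet?_zero_cons]
    rw [hA]
    -- evaluate B's port
    unfold solve_alt
    rw [if_neg hk]
    have e1 : PySem.Int.mod ((m : Int)) 2 = ((m % 2 : Nat) : Int) := by
      exact_mod_cast PySem.Int.mod_natCast m 2
    have e2 : PySem.Int.floordiv ((m : Int) + 1) 2 = (((m + 1) / 2 : Nat) : Int) := by
      have h : ((m : Int) + 1) = ((m + 1 : Nat) : Int) := by push_cast; ring
      rw [h]
      exact_mod_cast PySem.Int.floordiv_natCast (m + 1) 2
    have e3 : PySem.Int.floordiv ((m : Int)) 2 = ((m / 2 : Nat) : Int) := by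
      exact_mod_cast PySem.Int.floordiv_natCast m 2
    rw [e1, e2, e3]
    by_cases ho : m % 2 = 1
    · rw [if_pos (by exact_mod_cast ho)]
      rw [PySem.Int.mod_natCast t ((m + 1) / 2)]
      simp only [posF, if_pos ho]
      push_cast
      ring
    · rw [if_neg (by
        intro hcon
        exact ho (by exact_mod_cast hcon))]
      rw [PySem.Int.mod_natCast t m]
      simp only [posF, if_neg ho]
      have hrm : t % m < m := Nat.mod_lt _ (by omega)
      by_cases hlt : t % m < m / 2
      · rw [if_pos hlt,
          if_pos (show ((t % m : Nat) : Int) < ((m / 2 : Nat) : Int) by exact_mod_cast hlt)]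
        push_cast
        ring
      · rw [if_neg hlt,
          if_neg (show ¬ (((t % m : Nat) : Int) < ((m / 2 : Nat) : Int)) by exact_mod_cast hlt)]
        have hge : m / 2 ≤ t % m := by omega
        push_cast [Nat.cast_sub hge]
        ring
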